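-- pv_equiv track=rewrite | github.com/DaveV6/aoc2025 | puzzle4/puzzle.py | get_accessible_rolls
-- ===== SOURCE A (Python) =====
-- def get_accessible_rolls(rolls):
--     # get all possible directions in a grid
--     directions = [
--         (-1, 0), (-1, 1), (0, 1), (1, 1),
--         (1, 0), (1, -1), (0, -1), (-1, -1)
--     ]
--
--     accessible = 0
--     # go through the set of roll positions
--     for row, col in rolls:
--         neighbour_count = 0
--         # go through all the possible directions
--         for dr, dc in directions:
--             # if there is a neighbour around the roll add it to the count
--             if (row + dr, col + dc) in rolls:
--                 neighbour_count += 1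
--
--         # if there are fewer than 4 rolls around the roll increment the accessible count
--         if neighbour_count < 4:
--             accessible += 1
--
--     # return number of accessible rolls
--     return accessible
-- ===== SOURCE B (Python) =====
-- def get_accessible_rolls(rolls):
--     rolls = list(rolls)
--     directions = [
--         (-1, 0), (-1, 1), (0, 1), (1, 1),
--         (1, 0), (1, -1), (0, -1), (-1, -1)
--     ]
--     # scatter: for each distinct roll, bump a neighbour-count table at its 8 neighbours
--     table = {}
--     for row, col in set(rolls):
--         for dr, dc in directions:
--             key = (row + dr, col + dc)
--             table[key] = table.get(key, 0) + 1
--     # gather: a roll is accessible iff its table entry (distinct neighbours) is < 4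
--     accessible = 0
--     for pos in rolls:
--         if table.get(pos, 0) < 4:
--             accessible += 1
--     return accessible
-- ===== Notes on version B (the rewrite author's own statement) =====
-- stated objective: faster
-- what changed: Instead of scanning the whole rolls list for each of the 8 neighbours of every roll (quadratic list membership), B builds a neighbour-count hash table once by scattering +1 from each distinct roll position to its 8 neighbour cells, then tallies accessible rolls with a single O(1) table lookup per roll.
import Mathlib
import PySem

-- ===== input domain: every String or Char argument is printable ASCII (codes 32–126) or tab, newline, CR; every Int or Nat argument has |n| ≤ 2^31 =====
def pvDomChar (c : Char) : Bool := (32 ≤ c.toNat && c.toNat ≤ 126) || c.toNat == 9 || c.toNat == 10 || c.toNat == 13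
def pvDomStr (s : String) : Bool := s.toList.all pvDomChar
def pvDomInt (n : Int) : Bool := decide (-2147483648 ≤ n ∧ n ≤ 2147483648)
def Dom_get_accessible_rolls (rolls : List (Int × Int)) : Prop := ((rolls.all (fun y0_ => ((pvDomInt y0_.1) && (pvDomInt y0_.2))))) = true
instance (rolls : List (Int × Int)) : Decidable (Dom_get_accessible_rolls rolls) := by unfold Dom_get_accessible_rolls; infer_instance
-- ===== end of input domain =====

-- B replaces A's 8 whole-list membership scans per roll by one neighbour-count table
-- scattered from set(rolls), then a single table lookup per roll (objective: faster).

-- ===== PORT A =====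
def pvDirections : List (Int × Int) :=
  [(-1, 0), (-1, 1), (0, 1), (1, 1), (1, 0), (1, -1), (0, -1), (-1, -1)]

def get_accessible_rolls (rolls : List (Int × Int)) : Int :=
  rolls.foldl (fun accessible rc =>
    let neighbour_count : Int :=
      pvDirections.foldl (fun n d =>
        if (rc.1 + d.1, rc.2 + d.2) ∈ rolls then n + 1 else n) 0
    if neighbour_count < 4 then accessible + 1 else accessible) 0

-- ===== PORT B =====
def get_accessible_rolls_alt (rolls : List (Int × Int)) : Int :=
  let table : PySem.Dict (Int × Int) Int :=
    (PySem.Set.ofList rolls).foldl (fun t rc =>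
      pvDirections.foldl (fun t d =>
        let key := (rc.1 + d.1, rc.2 + d.2)
        t.insert key (t.getD key 0 + 1)) t) PySem.Dict.empty
  rolls.foldl (fun accessible pos =>
    if table.getD pos 0 < 4 then accessible + 1 else accessible) 0

-- ===== PRECONDITION & SPEC =====
def Spec_get_accessible_rolls (rolls : List (Int × Int)) (out : Int) : Prop := out = get_accessible_rolls_alt rolls
instance (rolls : List (Int × Int)) (out : Int) : Decidable (Spec_get_accessible_rolls rolls out) := by unfold Spec_get_accessible_rolls; infer_instance

-- ===== CLAIM (what is proved, stated in full; the proofs are below) =====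
def Claim_equal_get_accessible_rolls : Prop := ∀ (rolls : List (Int × Int)), Dom_get_accessible_rolls rolls → Spec_get_accessible_rolls rolls (get_accessible_rolls rolls)

-- ===== LEMMAS AND PROOFS =====

-- exchanging the order of a double list sum
lemma pvSumComm {α β : Type} (l1 : List α) (l2 : List β) (f : α → β → Nat) :
    (l1.map (fun a => (l2.map (f a)).sum)).sum
      = (l2.map (fun b => (l1.map (fun a => f a b)).sum)).sum := by
  induction l1 with
  | nil => simp
  | cons a t ih => simp [List.sum_map_add, ih]

-- a 0/1 indicator sum is a countP
lemma pvCountPSum {α : Type} (l : List α) (p : α → Bool) :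
    (l.map (fun x => if p x then (1:Nat) else 0)).sum = l.countP p := by
  induction l with
  | nil => simp
  | cons a t ih => simp [List.countP_cons, ih]; omega

-- the 8-direction star is symmetric: gathering at pos - d over it equals gathering at pos + d
lemma pvDirsFlip (S : List (Int × Int)) (x y : Int) :
    pvDirections.countP (fun d => decide ((x - d.1, y - d.2) ∈ S))
      = pvDirections.countP (fun d => decide ((x + d.1, y + d.2) ∈ S)) := by
  have hperm : (pvDirections.map (fun d => (-d.1, -d.2))).Perm pvDirections := by decide
  calc pvDirections.countP (fun d => decide ((x - d.1, y - d.2) ∈ S))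
      = (pvDirections.map (fun d => (-d.1, -d.2))).countP
          (fun d => decide ((x - d.1, y - d.2) ∈ S)) := (hperm.countP_eq _).symm
    _ = pvDirections.countP (fun d => decide ((x - -d.1, y - -d.2) ∈ S)) := by
          rw [List.countP_map]; rfl
    _ = pvDirections.countP (fun d => decide ((x + d.1, y + d.2) ∈ S)) := by
          apply List.countP_congr; intro d _; simp [sub_neg_eq_add]

-- B's scattered table, read at pos, is A's gathered neighbour count at pos
lemma pvTableGetD (rolls : List (Int × Int)) (pos : Int × Int) :
    ((PySem.Set.ofList rolls).foldl (fun t rc =>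
        pvDirections.foldl (fun t d =>
          t.insert (rc.1 + d.1, rc.2 + d.2) ((t.getD (rc.1 + d.1, rc.2 + d.2) 0) + 1)) t)
      (PySem.Dict.empty : PySem.Dict (Int × Int) Int)).getD pos 0
    = (pvDirections.countP (fun d => decide ((pos.1 + d.1, pos.2 + d.2) ∈ rolls)) : Int) := by
  have h1 : (PySem.Set.ofList rolls).foldl (fun t rc =>
        pvDirections.foldl (fun t d =>
          t.insert (rc.1 + d.1, rc.2 + d.2) ((t.getD (rc.1 + d.1, rc.2 + d.2) 0) + 1)) t)
      (PySem.Dict.empty : PySem.Dict (Int × Int) Int)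
      = ((PySem.Set.ofList rolls).flatMap
          (fun rc => pvDirections.map (fun d => (rc.1 + d.1, rc.2 + d.2)))).foldl
          (fun t x => t.insert x (t.getD x 0 + 1)) PySem.Dict.empty := by
    rw [List.foldl_flatMap]
    apply PySem.List.foldl_congr_mem
    intro acc rc _
    rw [List.foldl_map]
  rw [h1, PySem.Dict.getD_foldl_insert_add_one, PySem.Dict.getD_empty, zero_add]
  congr 1
  set S := PySem.Set.ofList rolls with hS
  calc List.count pos (S.flatMap (fun rc => pvDirections.map fun d => (rc.1 + d.1, rc.2 + d.2)))
      = (S.map (fun rc => (pvDirections.map (fun d =>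
          if ((rc.1 + d.1, rc.2 + d.2) == pos) then (1:Nat) else 0)).sum)).sum := by
        rw [List.count_flatMap]
        exact congrArg List.sum (List.map_congr_left (by
          intro rc _
          simp only [Function.comp_apply, List.count_eq_countP, List.countP_map]
          rw [pvCountPSum]
          rfl))
    _ = (pvDirections.map (fun d => (S.map (fun rc =>
          if ((rc.1 + d.1, rc.2 + d.2) == pos) then (1:Nat) else 0)).sum)).sum := by
        rw [pvSumComm]
    _ = (pvDirections.map (fun d => if (pos.1 - d.1, pos.2 - d.2) ∈ S then (1:Nat) else 0)).sum := by
        apply congrArg List.sum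
        apply List.map_congr_left
        intro d _
        rw [pvCountPSum]
        have : List.countP (fun rc => ((rc.1 + d.1, rc.2 + d.2) == pos)) S
            = List.count (pos.1 - d.1, pos.2 - d.2) S := by
          rw [List.count_eq_countP]
          apply List.countP_congr
          intro rc _
          simp only [beq_iff_eq, Prod.ext_iff]
          omega
        rw [this, List.Nodup.count (hS ▸ PySem.Set.nodup_ofList rolls)]
    _ = pvDirections.countP (fun d => decide ((pos.1 - d.1, pos.2 - d.2) ∈ S)) := by
        rw [← pvCountPSum]
        exact congrArg List.sum (List.map_congr_left (by intro d _; simp))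
    _ = pvDirections.countP (fun d => decide ((pos.1 + d.1, pos.2 + d.2) ∈ S)) := pvDirsFlip S pos.1 pos.2
    _ = pvDirections.countP (fun d => decide ((pos.1 + d.1, pos.2 + d.2) ∈ rolls)) := by
        apply List.countP_congr
        intro d _
        simp [hS, PySem.Set.mem_ofList]

-- ===== VERDICT (by name: the statement is the Claim_ definition above) =====
theorem get_accessible_rolls_spec : Claim_equal_get_accessible_rolls := by
  intro rolls _
  unfold Spec_get_accessible_rolls get_accessible_rolls get_accessible_rolls_alt
  apply PySem.List.foldl_congr_mem
  intro acc rc _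
  rw [PySem.List.foldl_ite_add_one (fun d => (rc.1 + d.1, rc.2 + d.2) ∈ rolls) pvDirections 0,
    pvTableGetD rolls rc]
  simp
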